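-- pv_equiv track=rewrite | github.com/AbimaelFranco/Code_Wars_Solutions | add_length.py | add_length
-- ===== SOURCE A (Python) =====
-- def add_length(str_):
--
--     str_ += " "
--     word = ""
--     result = []
--     counter = 0
--
--     for i in range(len(str_)):
--         if str_[i] != " ":
--             word += str_[i]
--             counter += 1
--         else:
--             word += f" {len(word)}"
--             result.append(word)
--             word = ""
--             counter = 0
--
--     return result
-- ===== SOURCE B (Python) =====
-- def add_length(str_):
--     return [f"{w} {len(w)}" for w in str_.split(" ")]
-- ===== Notes on version B (the rewrite author's own statement) =====
-- stated objective: idiomatic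
-- what changed: Replaces the character-level state machine (manual word accumulator, flush-on-space, per-character string concatenation) with a single-space split followed by a list comprehension that formats each token.
import Mathlib
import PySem

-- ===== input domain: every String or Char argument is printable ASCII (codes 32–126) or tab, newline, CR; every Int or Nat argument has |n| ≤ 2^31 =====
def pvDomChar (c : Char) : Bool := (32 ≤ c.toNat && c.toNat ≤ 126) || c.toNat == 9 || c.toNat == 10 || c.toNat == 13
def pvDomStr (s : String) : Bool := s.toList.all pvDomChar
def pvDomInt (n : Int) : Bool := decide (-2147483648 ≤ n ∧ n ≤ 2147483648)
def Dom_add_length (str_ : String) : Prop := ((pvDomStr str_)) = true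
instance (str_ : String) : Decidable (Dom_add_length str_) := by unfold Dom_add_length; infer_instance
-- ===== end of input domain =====

-- B replaces A's character-level state machine with a single-space split + a map; idiomatic, measured faster.

-- ===== PORT A =====
-- A's state: (word, result, counter); word kept as List Char (string facts are proved on the list side)
def add_length (str_ : String) : List String :=
  let s : List Char := str_.toList ++ [' ']  -- str_ += " "
  let fin :=
    (PySem.List.pyRange 0 (PySem.Chars.len s) 1).foldl
      (fun (st : List Char × List String × Int) i =>
        let c := PySem.List.pyGetD s i ' '   -- str_[i]; every i of the range is in bounds
        if c ≠ ' ' then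
          (st.1 ++ [c], st.2.1, st.2.2 + 1)
        else
          ([], st.2.1 ++ [String.ofList (st.1 ++ ' ' :: PySem.Int.toChars (PySem.Chars.len st.1))], 0))
      ([], [], 0)
  fin.2.1

-- ===== PORT B =====
def add_length_alt (str_ : String) : List String :=
  (PySem.Chars.splitOn str_.toList [' ']).map
    (fun w => String.ofList (w ++ ' ' :: PySem.Int.toChars (PySem.Chars.len w)))

-- ===== PRECONDITION & SPEC =====
def Spec_add_length (str_ : String) (out : List String) : Prop := out = add_length_alt str_
instance (str_ : String) (out : List String) : Decidable (Spec_add_length str_ out) := by unfold Spec_add_length; infer_instance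

-- ===== CLAIM (what is proved, stated in full; the proofs are below) =====
def Claim_equal_add_length : Prop := ∀ (str_ : String), Dom_add_length str_ → Spec_add_length str_ (add_length str_)

-- ===== LEMMAS AND PROOFS =====

-- reference word splitter: split l on ' ', with pre the word accumulated so far
def pvSplit1 (pre : List Char) : List Char → List (List Char)
  | [] => [pre]
  | c :: t => if c = ' ' then pre :: pvSplit1 [] t else pvSplit1 (pre ++ [c]) t

def pvOut (w : List Char) : String := String.ofList (w ++ ' ' :: PySem.Int.toChars (w.length : Int))

def pvStep (st : List Char × List String × Int) (c : Char) : List Char × List String × Int :=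
  if c ≠ ' ' then (st.1 ++ [c], st.2.1, st.2.2 + 1)
  else ([], st.2.1 ++ [String.ofList (st.1 ++ ' ' :: PySem.Int.toChars (st.1.length : Int))], 0)

lemma pvGo_spec (fuel : Nat) : ∀ (l cur : List Char) (acc : List (List Char)),
    l.length < fuel →
    PySem.Chars.splitOn.go [' '] fuel l cur acc = acc.reverse ++ pvSplit1 cur.reverse l := by
  induction fuel with
  | zero => intro l cur acc h; omega
  | succ fuel ih =>
    intro l cur acc h
    cases l with
    | nil => simp [PySem.Chars.splitOn.go, pvSplit1]
    | cons c rest =>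
      by_cases hc : c = ' '
      · subst hc
        have hp : List.isPrefixOf [' '] (' ' :: rest) = true := by
          simp [List.isPrefixOf]
        rw [PySem.Chars.splitOn.go]
        simp only [hp, if_pos, List.length_cons, List.length_nil, List.drop_succ_cons,
          List.drop_zero]
        rw [ih rest [] (cur.reverse :: acc) (by simp only [List.length_cons] at h; omega)]
        rw [show pvSplit1 cur.reverse (' ' :: rest) = cur.reverse :: pvSplit1 [] rest from by
          rw [pvSplit1]; simp]
        simp only [List.reverse_cons, List.append_assoc, List.singleton_append, List.reverse_nil]
      · have hp : List.isPrefixOf [' '] (c :: rest) = false := by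
          simp [List.isPrefixOf, Ne.symm hc]
        rw [PySem.Chars.splitOn.go]
        simp only [hp, Bool.false_eq_true, if_false]
        rw [ih rest (c :: cur) acc (by simp only [List.length_cons] at h; omega)]
        rw [show pvSplit1 cur.reverse (c :: rest) = pvSplit1 (cur.reverse ++ [c]) rest from by
          rw [pvSplit1, if_neg hc]]
        rw [List.reverse_cons]

lemma pvSplitOn_eq (cs : List Char) :
    PySem.Chars.splitOn cs [' '] = pvSplit1 [] cs := by
  unfold PySem.Chars.splitOn
  rw [pvGo_spec (cs.length + 1) cs [] [] (by omega)]
  simp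

-- A's loop over l ++ [' '] produces exactly the formatted words of pvSplit1
lemma pvFoldA (l : List Char) : ∀ (pre : List Char) (res : List String) (cnt : Int),
    ((l ++ [' ']).foldl pvStep (pre, res, cnt)).2.1
    = res ++ (pvSplit1 pre l).map pvOut := by
  induction l with
  | nil => intro pre res cnt; simp [pvStep, pvSplit1, pvOut]
  | cons c t ih =>
    intro pre res cnt
    rw [List.cons_append, List.foldl_cons]
    by_cases hc : c = ' '
    · subst hc
      rw [show pvStep (pre, res, cnt) ' '
            = ([], res ++ [pvOut pre], 0) from by simp [pvStep, pvOut]]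
      rw [ih, pvSplit1]
      simp
    · rw [show pvStep (pre, res, cnt) c = (pre ++ [c], res, cnt + 1) from by simp [pvStep, hc]]
      rw [ih, pvSplit1]
      simp [hc]

-- ===== VERDICT (by name: the statement is the Claim_ definition above) =====
theorem add_length_spec : Claim_equal_add_length := by
  intro str_ _
  unfold Spec_add_length add_length add_length_alt
  rw [pvSplitOn_eq]
  simp only [PySem.Chars.len_eq]
  show (List.foldl (fun st i => pvStep st (PySem.List.pyGetD (str_.toList ++ [' ']) i ' '))
      ([], [], 0) (PySem.List.pyRange 0 ((str_.toList ++ [' ']).length : Int))).2.1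
    = List.map pvOut (pvSplit1 [] str_.toList)
  rw [PySem.List.foldl_pyRange_zero_pyGetD' (str_.toList ++ [' ']) ' ' pvStep ([], [], 0)]
  rw [pvFoldA str_.toList [] [] 0]
  simp
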